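-- pv_equiv track=rewrite | github.com/lucaschoi99/Algorithm-study_personal | algorithm study(2022)/Programmers/kakao2023/3.py | tryOne
-- ===== SOURCE A (Python) =====
-- from collections import defaultdict
--
-- def tryOne(users, emoticons, salesInfo):
--     addUsers = 0
--     addPrice = 0
--     emoPrice = [x*y for x,y in zip(emoticons, salesInfo)]
--     userInfo = defaultdict(int)
--
--     # 기준에 따른 이모티콘 구입 전략
--     for userNum, (salesNum, priceNum) in enumerate(users):
--         for cnt, saleItem in enumerate(salesInfo):
--             if saleItem*100 <= (100-salesNum):
--                 userInfo[userNum] += emoPrice[cnt]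
--                 addPrice += emoPrice[cnt]
--
--     for key, val in userInfo.items():
--         # 이모티콘 플러스 구입 조건
--         if users[key][1] <= val:
--             addUsers += 1
--             addPrice -= val
--
--
--     return addUsers, addPrice
-- ===== SOURCE B (Python) =====
-- def tryOne(users, emoticons, salesInfo):
--     addUsers = 0
--     addPrice = 0
--     for salesNum, priceNum in users:
--         subtotal = 0
--         bought = False
--         for e, s in zip(emoticons, salesInfo):
--             if s * 100 <= 100 - salesNum:
--                 bought = True
--                 subtotal += e * s
--         if bought and priceNum <= subtotal:
--             addUsers += 1
--         else:
--             addPrice += subtotal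
--     return addUsers, addPrice
-- ===== Notes on version B (the rewrite author's own statement) =====
-- stated objective: simpler
-- what changed: B fuses A's two passes into a single loop over users that computes each user's qualifying subtotal directly from zip(emoticons, salesInfo) and decides subscription immediately, eliminating the emoPrice index table and the userInfo defaultdict entirely.
-- crash fix: A raises IndexError whenever some user's discount condition fires at an index >= len(emoticons) (emoPrice is truncated by zip); B simply skips those nonexistent emoticons and returns normally. — e.g. on tryOne([(0, 5)], [], [0]): A raises IndexError, B returns (0, 0)
import Mathlib
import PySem

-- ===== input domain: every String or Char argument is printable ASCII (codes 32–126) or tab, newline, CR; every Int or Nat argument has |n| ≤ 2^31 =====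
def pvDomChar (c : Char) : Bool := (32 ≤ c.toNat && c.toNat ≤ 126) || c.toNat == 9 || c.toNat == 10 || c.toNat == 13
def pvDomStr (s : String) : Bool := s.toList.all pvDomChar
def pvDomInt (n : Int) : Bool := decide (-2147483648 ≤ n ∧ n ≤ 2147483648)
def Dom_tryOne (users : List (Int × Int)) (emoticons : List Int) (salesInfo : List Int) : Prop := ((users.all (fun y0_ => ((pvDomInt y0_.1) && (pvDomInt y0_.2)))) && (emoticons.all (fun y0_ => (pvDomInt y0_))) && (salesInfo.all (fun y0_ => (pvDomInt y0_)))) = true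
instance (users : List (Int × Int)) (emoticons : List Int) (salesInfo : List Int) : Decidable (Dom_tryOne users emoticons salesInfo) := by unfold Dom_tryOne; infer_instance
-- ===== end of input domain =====

-- B fuses A's two passes into one loop over users (no emoPrice table, no userInfo dict);
-- same return value on every input where A returns normally (Pre_ excludes exactly A's IndexError inputs).


-- ===== PORT A =====
-- literal transliteration of A: emoPrice table, nested enumerate loops accumulating
-- (addPrice, userInfo defaultdict), then a pass over userInfo.items().
-- emoPrice[cnt] is PySem.List.pyGet? (evaluated twice, as Python does); the '.getD 0' arm is
-- unreachable under Pre_ (A raises on exactly those inputs).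
def tryOne (users : List (Int × Int)) (emoticons : List Int) (salesInfo : List Int) : Int × Int :=
  let emoPrice : List Int := (emoticons.zip salesInfo).map (fun p => p.1 * p.2)
  let s1 : Int × PySem.Dict Int Int :=
    (PySem.List.enumerate users 0).foldl (fun st ue =>
      (PySem.List.enumerate salesInfo 0).foldl (fun st2 cs =>
        if cs.2 * 100 ≤ 100 - ue.2.1 then
          (st2.1 + (PySem.List.pyGet? emoPrice cs.1).getD 0,
           st2.2.insert ue.1 (st2.2.getD ue.1 0 + (PySem.List.pyGet? emoPrice cs.1).getD 0))
        else st2) st) (0, PySem.Dict.empty)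
  s1.2.items.foldl (fun st kv =>
      if ((PySem.List.pyGet? users kv.1).getD (0, 0)).2 ≤ kv.2 then (st.1 + 1, st.2 - kv.2)
      else st) (0, s1.1)

-- ===== PORT B =====
-- literal transliteration of Source B: single loop over users; per user one fold over
-- zip(emoticons, salesInfo) computing (subtotal, bought), then decide immediately.
def tryOne_alt (users : List (Int × Int)) (emoticons : List Int) (salesInfo : List Int) : Int × Int :=
  users.foldl (fun st u =>
    let r : Int × Bool := (emoticons.zip salesInfo).foldl (fun acc p =>
      if p.2 * 100 ≤ 100 - u.1 then (acc.1 + p.1 * p.2, true) else acc) (0, false)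
    if r.2 && decide (u.2 ≤ r.1) then (st.1 + 1, st.2) else (st.1, st.2 + r.1)) (0, 0)

-- ===== PRECONDITION & SPEC =====
-- Pre_ excludes exactly the inputs on which A raises IndexError: some user's discount
-- condition fires at an index past len(emoticons), where emoPrice (zip-truncated) has no entry.
def Pre_tryOne (users : List (Int × Int)) (emoticons : List Int) (salesInfo : List Int) : Prop :=
  ∀ u ∈ users, ∀ s ∈ salesInfo.drop emoticons.length, ¬ (s * 100 ≤ 100 - u.1)
instance (users : List (Int × Int)) (emoticons : List Int) (salesInfo : List Int) : Decidable (Pre_tryOne users emoticons salesInfo) := by unfold Pre_tryOne; infer_instance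

def pvWitness_tryOne : (List (Int × Int)) × List Int × List Int := ([(10, 5), (40, 2)], [2, 3], [40, 90])

-- A raises IndexError whenever some user's discount condition fires at an index >= len(emoticons); B skips those nonexistent emoticons and returns normally.
def Raises_tryOne (users : List (Int × Int)) (emoticons : List Int) (salesInfo : List Int) : Prop :=
  ∃ u ∈ users, ∃ s ∈ salesInfo.drop emoticons.length, s * 100 ≤ 100 - u.1
instance (users : List (Int × Int)) (emoticons : List Int) (salesInfo : List Int) : Decidable (Raises_tryOne users emoticons salesInfo) := by unfold Raises_tryOne; infer_instance
def pvRaiseWitness_tryOne : (List (Int × Int)) × List Int × List Int := ([(0, 5)], [], [0])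
def pvRaiseWitnessOut_tryOne : Int × Int := (0, 0)

def Spec_tryOne (users : List (Int × Int)) (emoticons : List Int) (salesInfo : List Int) (out : Int × Int) : Prop := out = tryOne_alt users emoticons salesInfo
instance (users : List (Int × Int)) (emoticons : List Int) (salesInfo : List Int) (out : Int × Int) : Decidable (Spec_tryOne users emoticons salesInfo out) := by unfold Spec_tryOne; infer_instance

-- ===== CLAIM (what is proved, stated in full; the proofs are below) =====
def Claim_equal_tryOne : Prop := ∀ (users : List (Int × Int)) (emoticons : List Int) (salesInfo : List Int), Dom_tryOne users emoticons salesInfo → Pre_tryOne users emoticons salesInfo → Spec_tryOne users emoticons salesInfo (tryOne users emoticons salesInfo)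
def Claim_raises_tryOne : Prop := (∀ (users : List (Int × Int)) (emoticons : List Int) (salesInfo : List Int), Dom_tryOne users emoticons salesInfo → Raises_tryOne users emoticons salesInfo → ¬ Pre_tryOne users emoticons salesInfo) ∧ (Dom_tryOne (pvRaiseWitness_tryOne.1) (pvRaiseWitness_tryOne.2.1) (pvRaiseWitness_tryOne.2.2) ∧ Raises_tryOne (pvRaiseWitness_tryOne.1) (pvRaiseWitness_tryOne.2.1) (pvRaiseWitness_tryOne.2.2) ∧ tryOne_alt (pvRaiseWitness_tryOne.1) (pvRaiseWitness_tryOne.2.1) (pvRaiseWitness_tryOne.2.2) = pvRaiseWitnessOut_tryOne)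

-- ===== LEMMAS AND PROOFS =====

-- per-user subtotal, "bought at least one" flag, and subscription condition
def subQ (zs : List (Int × Int)) (sn : Int) : Int :=
  ((zs.filter (fun p => decide (p.2 * 100 ≤ 100 - sn))).map (fun p => p.1 * p.2)).sum
def anyQ (zs : List (Int × Int)) (sn : Int) : Bool :=
  zs.any (fun p => decide (p.2 * 100 ≤ 100 - sn))
def condU (zs : List (Int × Int)) (u : Int × Int) : Bool :=
  anyQ zs u.1 && decide (u.2 ≤ subQ zs u.1)

theorem innerB_eq (zs : List (Int × Int)) (sn : Int) : ∀ (a : Int) (b : Bool),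
    zs.foldl (fun acc p => if p.2 * 100 ≤ 100 - sn then (acc.1 + p.1 * p.2, true) else acc) (a, b)
      = (a + subQ zs sn, b || anyQ zs sn) := by
  induction zs with
  | nil => intro a b; simp [subQ, anyQ]
  | cons h t ih =>
    intro a b
    by_cases hq : h.2 * 100 ≤ 100 - sn
    · simp [List.foldl_cons, hq, ih, subQ, anyQ, List.filter_cons]
      ring
    · simp [List.foldl_cons, hq, ih, subQ, anyQ, List.filter_cons]

theorem outerB_eq (zs : List (Int × Int)) : ∀ (us : List (Int × Int)) (a b : Int),
    us.foldl (fun st u => if condU zs u then (st.1 + 1, st.2) else (st.1, st.2 + subQ zs u.1)) (a, b)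
      = (a + (us.countP (condU zs) : Int),
         b + ((us.filter (fun u => ! condU zs u)).map (fun u => subQ zs u.1)).sum) := by
  intro us
  induction us with
  | nil => intro a b; simp
  | cons h t ih =>
    intro a b
    by_cases hc : condU zs h
    · simp [List.foldl_cons, hc, ih, List.filter_cons]
      omega
    · simp [List.foldl_cons, hc, ih, List.filter_cons]
      omega

theorem foldl_id {α β : Type} (l : List α) (b : β) : l.foldl (fun st _ => st) b = b := by
  induction l with
  | nil => rfl
  | cons h t ih => simpa using ih

theorem take_len_eq_map_snd_zip : ∀ (e s : List Int), s.take e.length = (e.zip s).map (·.2) := by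
  intro e
  induction e with
  | nil => intro s; simp
  | cons x xs ih =>
    intro s
    cases s with
    | nil => simp
    | cons y ys => simp [ih]

-- A's inner loop over the zip-covered prefix of salesInfo: pre = already-consumed prefix of emoPrice
theorem innerA_zip (u sn : Int) : ∀ (zs : List (Int × Int)) (pre : List Int) (p : Int) (d : PySem.Dict Int Int),
    (PySem.List.enumerate (zs.map (·.2)) pre.length).foldl (fun st2 cs =>
        if cs.2 * 100 ≤ 100 - sn then
          (st2.1 + (PySem.List.pyGet? (pre ++ zs.map (fun q => q.1 * q.2)) cs.1).getD 0,
           st2.2.insert u (st2.2.getD u 0 + (PySem.List.pyGet? (pre ++ zs.map (fun q => q.1 * q.2)) cs.1).getD 0))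
        else st2) (p, d)
      = (p + subQ zs sn, if anyQ zs sn then d.insert u (d.getD u 0 + subQ zs sn) else d) := by
  intro zs
  induction zs with
  | nil => intro pre p d; simp [PySem.List.enumerate_nil, subQ, anyQ]
  | cons h t ih =>
    intro pre p d
    have hL : pre ++ (h :: t).map (fun q => q.1 * q.2)
        = (pre ++ [h.1 * h.2]) ++ t.map (fun q => q.1 * q.2) := by simp
    have hget : PySem.List.pyGet? ((pre ++ [h.1 * h.2]) ++ t.map (fun q => q.1 * q.2))
        ((pre.length : Nat) : Int) = some (h.1 * h.2) := by
      rw [← hL]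
      simpa using PySem.List.pyGet?_append_length pre (h.1 * h.2) (t.map (fun q => q.1 * q.2))
    have hcast : ((pre.length : Nat) : Int) + 1 = (((pre ++ [h.1 * h.2]).length : Nat) : Int) := by
      simp
    rw [hL, List.map_cons, PySem.List.enumerate_cons, List.foldl_cons]
    by_cases hq : h.2 * 100 ≤ 100 - sn
    · have hsub : subQ (h :: t) sn = h.1 * h.2 + subQ t sn := by
        simp [subQ, List.filter_cons, hq]
      have hany : anyQ (h :: t) sn = true := by simp [anyQ, hq]
      simp only [if_pos hq, hget, Option.getD_some]
      rw [hcast, ih (pre ++ [h.1 * h.2]), hsub, hany]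
      by_cases ha : anyQ t sn
      · simp only [ha, if_true]
        rw [PySem.Dict.getD_insert_self, PySem.Dict.insert_insert_self]
        refine Prod.ext (by ring) ?_
        simp only
        congr 1
        ring
      · have hz : subQ t sn = 0 := by
          simp only [anyQ, Bool.not_eq_true] at ha
          rw [Bool.eq_false_iff] at ha
          have : t.filter (fun p => decide (p.2 * 100 ≤ 100 - sn)) = [] := by
            rw [List.filter_eq_nil_iff]
            intro a hmem
            simp only [decide_eq_true_eq]
            intro hle
            exact ha (List.any_of_mem hmem (by simpa using hle))
          simp [subQ, this]
        simp [ha, hz]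
    · have hsub : subQ (h :: t) sn = subQ t sn := by
        simp [subQ, List.filter_cons, hq]
      have hany : anyQ (h :: t) sn = anyQ t sn := by simp [anyQ, hq]
      simp only [if_neg hq]
      rw [hcast, ih (pre ++ [h.1 * h.2])]
      simp [hsub, hany]

-- A's full inner loop (over enumerate(salesInfo)) for one user, under Pre_ for that user
theorem innerA_full (emoticons salesInfo : List Int) (u sn : Int)
    (Hs : ∀ s ∈ salesInfo.drop emoticons.length, ¬ (s * 100 ≤ 100 - sn)) :
    ∀ (p : Int) (d : PySem.Dict Int Int),
    (PySem.List.enumerate salesInfo 0).foldl (fun st2 cs =>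
        if cs.2 * 100 ≤ 100 - sn then
          (st2.1 + (PySem.List.pyGet? ((emoticons.zip salesInfo).map (fun q => q.1 * q.2)) cs.1).getD 0,
           st2.2.insert u (st2.2.getD u 0 + (PySem.List.pyGet? ((emoticons.zip salesInfo).map (fun q => q.1 * q.2)) cs.1).getD 0))
        else st2) (p, d)
      = (p + subQ (emoticons.zip salesInfo) sn,
         if anyQ (emoticons.zip salesInfo) sn then
           d.insert u (d.getD u 0 + subQ (emoticons.zip salesInfo) sn) else d) := by
  intro p d
  set zs := emoticons.zip salesInfo with hzs
  have hsplit : salesInfo = salesInfo.take emoticons.length ++ salesInfo.drop emoticons.length :=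
    (List.take_append_drop _ _).symm
  rw [hsplit, PySem.List.enumerate_append, List.foldl_append]
  have htake : salesInfo.take emoticons.length = zs.map (·.2) := take_len_eq_map_snd_zip _ _
  have h1 : (PySem.List.enumerate (salesInfo.take emoticons.length) 0).foldl (fun st2 cs =>
        if cs.2 * 100 ≤ 100 - sn then
          (st2.1 + (PySem.List.pyGet? (zs.map (fun q => q.1 * q.2)) cs.1).getD 0,
           st2.2.insert u (st2.2.getD u 0 + (PySem.List.pyGet? (zs.map (fun q => q.1 * q.2)) cs.1).getD 0))
        else st2) (p, d)
      = (p + subQ zs sn, if anyQ zs sn then d.insert u (d.getD u 0 + subQ zs sn) else d) := by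
    rw [htake]
    have := innerA_zip u sn zs [] p d
    simpa using this
  rw [h1]
  -- the tail past len(emoticons): every step is the identity by Hs
  have h2 : ∀ (st : Int × PySem.Dict Int Int),
      (PySem.List.enumerate (salesInfo.drop emoticons.length) (0 + (salesInfo.take emoticons.length).length)).foldl
        (fun st2 cs =>
          if cs.2 * 100 ≤ 100 - sn then
            (st2.1 + (PySem.List.pyGet? (zs.map (fun q => q.1 * q.2)) cs.1).getD 0,
             st2.2.insert u (st2.2.getD u 0 + (PySem.List.pyGet? (zs.map (fun q => q.1 * q.2)) cs.1).getD 0))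
          else st2) st = st := by
    intro st
    rw [PySem.List.foldl_congr_mem (g := fun st2 _ => st2)]
    · exact foldl_id _ _
    · intro acc x hx
      rcases (PySem.List.mem_enumerate_iff _ _ _).1 hx with ⟨k, hk, hxeq⟩
      have hmem : x.2 ∈ salesInfo.drop emoticons.length := by
        rw [hxeq]; exact List.getElem_mem _
      rw [if_neg (Hs x.2 hmem)]
  rw [h2]

-- A's outer loop: price accumulates all subtotals; the dict appends one fresh entry per "bought" user
theorem outerA_eq (emoticons salesInfo : List Int) :
    ∀ (us : List (Int × Int)) (s : Int) (p : Int) (d : PySem.Dict Int Int),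
    (∀ u ∈ us, ∀ x ∈ salesInfo.drop emoticons.length, ¬ (x * 100 ≤ 100 - u.1)) →
    (∀ key ∈ d.keys, key < s) →
    (PySem.List.enumerate us s).foldl (fun st ue =>
      (PySem.List.enumerate salesInfo 0).foldl (fun st2 cs =>
        if cs.2 * 100 ≤ 100 - ue.2.1 then
          (st2.1 + (PySem.List.pyGet? ((emoticons.zip salesInfo).map (fun q => q.1 * q.2)) cs.1).getD 0,
           st2.2.insert ue.1 (st2.2.getD ue.1 0 + (PySem.List.pyGet? ((emoticons.zip salesInfo).map (fun q => q.1 * q.2)) cs.1).getD 0))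
        else st2) st) (p, d)
      = (p + (us.map (fun u => subQ (emoticons.zip salesInfo) u.1)).sum,
         PySem.Dict.mk (d.items ++ (PySem.List.enumerate us s).filterMap (fun iu =>
           if anyQ (emoticons.zip salesInfo) iu.2.1 then
             some (iu.1, subQ (emoticons.zip salesInfo) iu.2.1) else none))) := by
  intro us
  induction us with
  | nil =>
    intro s p d _ _
    simp [PySem.List.enumerate_nil]
  | cons u t ih =>
    intro s p d Hs Hk
    rw [PySem.List.enumerate_cons, List.foldl_cons]
    rw [innerA_full emoticons salesInfo s u.1 (Hs u (List.mem_cons_self)) p d]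
    have hfresh : d.contains s = false := by
      rw [PySem.Dict.contains_eq_decide_mem_keys]
      simp only [decide_eq_false_iff_not]
      intro hmem
      exact absurd (Hk _ hmem) (lt_irrefl _)
    have hkeys' : ∀ key ∈ d.keys, key < s + 1 := fun key h => lt_trans (Hk key h) (by omega)
    by_cases ha : anyQ (emoticons.zip salesInfo) u.1
    · rw [if_pos ha]
      have hgd : d.getD s 0 = 0 := by
        rw [PySem.Dict.getD_eq_get?_getD,
          show d.get? s = none from (PySem.Dict.get?_eq_none_iff_contains _ _).2 hfresh]
        rfl
      rw [hgd, ih (s + 1) _ _ (fun v hv => Hs v (List.mem_cons_of_mem _ hv))]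
      · refine Prod.ext ?_ ?_
        · simp only [List.map_cons, List.sum_cons]
          ring
        · have hitems : (d.insert s (subQ (emoticons.zip salesInfo) u.1)).items
              = d.items ++ [(s, subQ (emoticons.zip salesInfo) u.1)] := by
            rw [PySem.Dict.items_insert]
            simp [hfresh]
          simp [hitems, ha]
      · intro key hkey
        rcases (PySem.Dict.mem_keys_insert _ _ _ _).1 hkey with h | h
        · omega
        · have := Hk key h; omega
    · rw [if_neg ha, ih (s + 1) _ _ (fun v hv => Hs v (List.mem_cons_of_mem _ hv)) hkeys']
      refine Prod.ext ?_ ?_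
      · simp only [List.map_cons, List.sum_cons]
        ring
      · simp only [List.filterMap_cons, ha, Bool.false_eq_true, if_false]

-- phase-2 fold closed form over an arbitrary items list
theorem phase2_fold (users : List (Int × Int)) :
    ∀ (E : List (Int × Int)) (a p : Int),
    E.foldl (fun st kv =>
        if ((PySem.List.pyGet? users kv.1).getD (0, 0)).2 ≤ kv.2 then (st.1 + 1, st.2 - kv.2)
        else st) (a, p)
      = (a + (E.countP (fun kv => decide (((PySem.List.pyGet? users kv.1).getD (0, 0)).2 ≤ kv.2)) : Int),
         p - ((E.filter (fun kv => decide (((PySem.List.pyGet? users kv.1).getD (0, 0)).2 ≤ kv.2))).map (·.2)).sum) := by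
  intro E
  induction E with
  | nil => intro a p; simp
  | cons h t ih =>
    intro a p
    by_cases hc : ((PySem.List.pyGet? users h.1).getD (0, 0)).2 ≤ h.2
    · simp [List.foldl_cons, hc, ih, List.filter_cons]
      refine ⟨by push_cast; ring, by ring⟩
    · simp [List.foldl_cons, hc, ih, List.filter_cons]

-- the dict entries, counted/summed through the phase-2 test, give exactly condU over users
theorem entries_spec (emoticons salesInfo : List Int) (users : List (Int × Int)) :
    ∀ (us : List (Int × Int)) (s : Int),
    (∀ (j : Nat), j < us.length → PySem.List.pyGet? users (s + (j : Int)) = some us[j]!) →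
    (((PySem.List.enumerate us s).filterMap (fun iu =>
        if anyQ (emoticons.zip salesInfo) iu.2.1 then
          some (iu.1, subQ (emoticons.zip salesInfo) iu.2.1) else none)).countP
        (fun kv => decide (((PySem.List.pyGet? users kv.1).getD (0, 0)).2 ≤ kv.2)) : Int)
      = (us.countP (condU (emoticons.zip salesInfo)) : Int)
    ∧ ((((PySem.List.enumerate us s).filterMap (fun iu =>
        if anyQ (emoticons.zip salesInfo) iu.2.1 then
          some (iu.1, subQ (emoticons.zip salesInfo) iu.2.1) else none)).filter
        (fun kv => decide (((PySem.List.pyGet? users kv.1).getD (0, 0)).2 ≤ kv.2))).map (·.2)).sum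
      = ((us.filter (condU (emoticons.zip salesInfo))).map (fun u => subQ (emoticons.zip salesInfo) u.1)).sum := by
  intro us
  induction us with
  | nil => intro s _; simp [PySem.List.enumerate_nil]
  | cons u t ih =>
    intro s H
    have Hu : PySem.List.pyGet? users s = some u := by
      have := H 0 (by simp)
      simpa using this
    have Ht : ∀ (j : Nat), j < t.length → PySem.List.pyGet? users (s + 1 + (j : Int)) = some t[j]! := by
      intro j hj
      have h2 := H (j + 1) (by simpa using Nat.succ_lt_succ hj)
      have h3 : s + ((j + 1 : Nat) : Int) = s + 1 + (j : Int) := by push_cast; ring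
      rw [h3] at h2
      simpa using h2
    rcases ih (s + 1) Ht with ⟨ih1, ih2⟩
    rw [PySem.List.enumerate_cons]
    by_cases ha : anyQ (emoticons.zip salesInfo) u.1
    · by_cases hp : u.2 ≤ subQ (emoticons.zip salesInfo) u.1
      · have hcond : condU (emoticons.zip salesInfo) u = true := by simp [condU, ha, hp]
        constructor
        · simp [List.filterMap_cons, List.filter_cons, List.countP_cons, ha, hcond, Hu, hp]
          omega
        · simp [List.filterMap_cons, List.filter_cons, List.countP_cons, ha, hcond, Hu, hp]
          omega
      · have hcond : condU (emoticons.zip salesInfo) u = false := by simp [condU, hp]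
        constructor
        · simp [List.filterMap_cons, List.filter_cons, List.countP_cons, ha, hcond, Hu, hp]
          omega
        · simp [List.filterMap_cons, List.filter_cons, List.countP_cons, ha, hcond, Hu, hp]
          omega
    · have hcond : condU (emoticons.zip salesInfo) u = false := by simp [condU, ha]
      constructor
      · simp [List.filterMap_cons, List.filter_cons, List.countP_cons, ha, hcond, Hu]
        omega
      · simp [List.filterMap_cons, List.filter_cons, List.countP_cons, ha, hcond, Hu]
        omega

theorem sum_filter_split (zs : List (Int × Int)) :
    ∀ (us : List (Int × Int)),
    ((us.filter (condU zs)).map (fun u => subQ zs u.1)).sum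
      + ((us.filter (fun u => ! condU zs u)).map (fun u => subQ zs u.1)).sum
      = (us.map (fun u => subQ zs u.1)).sum := by
  intro us
  induction us with
  | nil => simp
  | cons u t ih =>
    by_cases hc : condU zs u
    · simp [List.filter_cons, hc]
      omega
    · simp [List.filter_cons, hc]
      omega

-- ===== VERDICT (by name: the statement is the Claim_ definition above) =====
theorem tryOne_spec : Claim_equal_tryOne := by
  intro users emoticons salesInfo _ hpre
  unfold Spec_tryOne
  simp only [tryOne, tryOne_alt]
  have Hs : ∀ u ∈ users, ∀ s ∈ salesInfo.drop emoticons.length, ¬ (s * 100 ≤ 100 - u.1) := hpre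
  have Hk : ∀ key ∈ (PySem.Dict.empty : PySem.Dict Int Int).keys, key < (0 : Int) := by
    simp [PySem.Dict.keys_empty]
  have h1 := outerA_eq emoticons salesInfo users 0 0 PySem.Dict.empty Hs Hk
  rw [h1]
  have H0 : ∀ (j : Nat), j < users.length → PySem.List.pyGet? users ((0 : Int) + (j : Int)) = some users[j]! := by
    intro j hj
    rw [zero_add, PySem.List.pyGet?_natCast]
    simp [List.getElem?_eq_getElem hj, List.getElem!_eq_getElem?_getD,
      List.getElem?_eq_getElem hj]
  have h2 := entries_spec emoticons salesInfo users users 0 H0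
  rcases h2 with ⟨h2c, h2s⟩
  have hempty : (PySem.Dict.empty : PySem.Dict Int Int).items = [] := rfl
  rw [phase2_fold]
  simp only [hempty, List.nil_append, h2c, h2s]
  -- B side
  have hB : ∀ (st u : Int × Int),
      (if (((emoticons.zip salesInfo).foldl (fun acc p =>
              if p.2 * 100 ≤ 100 - u.1 then (acc.1 + p.1 * p.2, true) else acc) (0, false)).2 &&
            decide (u.2 ≤ ((emoticons.zip salesInfo).foldl (fun acc p =>
              if p.2 * 100 ≤ 100 - u.1 then (acc.1 + p.1 * p.2, true) else acc) (0, false)).1)) = true then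
         (st.1 + 1, st.2)
       else (st.1, st.2 + ((emoticons.zip salesInfo).foldl (fun acc p =>
              if p.2 * 100 ≤ 100 - u.1 then (acc.1 + p.1 * p.2, true) else acc) (0, false)).1))
      = (if condU (emoticons.zip salesInfo) u then (st.1 + 1, st.2)
         else (st.1, st.2 + subQ (emoticons.zip salesInfo) u.1)) := by
    intro st u
    rw [innerB_eq (emoticons.zip salesInfo) u.1 0 false]
    simp only [Bool.false_or, zero_add, condU]
    rfl
  have hfold := PySem.List.foldl_congr_mem users _ _ ((0 : Int), (0 : Int))
    (fun st u _ => hB st u)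
  rw [hfold, outerB_eq]
  have hsplit := sum_filter_split (emoticons.zip salesInfo) users
  refine Prod.ext ?_ ?_ <;> simp <;> omega

theorem tryOne_raises : Claim_raises_tryOne := by
  unfold Claim_raises_tryOne
  constructor
  · intro users emoticons salesInfo _ hr hpre
    rcases hr with ⟨u, hu, s, hs, hq⟩
    exact hpre u hu s hs hq
  · decide

-- self-check: the raise-region witness really lies inside Raises_tryOne (extracted from tryOne_raises)
theorem tryOne_raise_region_witness :
    Raises_tryOne (pvRaiseWitness_tryOne.1) (pvRaiseWitness_tryOne.2.1) (pvRaiseWitness_tryOne.2.2) := by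
  have h := tryOne_raises
  unfold Claim_raises_tryOne at h
  exact h.2.2.1
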